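-- pv_equiv track=rewrite | github.com/Vostbur/codewars_solutions | Python/5 kyu/Simple Fun #178 Faulty Odometer/Kata.py | faulty_odometer
-- ===== SOURCE A (Python) =====
-- def faulty_odometer(n):
--     if n == 0:
--         return 0
--     else:
--         d = n % 10
--         if d > 4:
--             d -= 1
--         return d + 9 * faulty_odometer(n//10)
-- ===== SOURCE B (Python) =====
-- def faulty_odometer(n):
--     result = 0
--     place = 1
--     while n > 0:
--         d = n % 10
--         if d > 4:
--             d -= 1
--         result += d * place
--         place *= 9
--         n //= 10
--     return result
-- ===== Notes on version B (the rewrite author's own statement) =====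
-- stated objective: simpler
-- what changed: Replaces A's most-significant-first recursion with an iterative least-significant-first loop that threads an explicit place-value accumulator (place *= 9).
-- crash fix: On negative n, A raises RecursionError (n//10 never reaches 0) while B's loop condition n > 0 makes it return 0. — e.g. on faulty_odometer(-5): A raises RecursionError, B returns 0
import Mathlib
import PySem

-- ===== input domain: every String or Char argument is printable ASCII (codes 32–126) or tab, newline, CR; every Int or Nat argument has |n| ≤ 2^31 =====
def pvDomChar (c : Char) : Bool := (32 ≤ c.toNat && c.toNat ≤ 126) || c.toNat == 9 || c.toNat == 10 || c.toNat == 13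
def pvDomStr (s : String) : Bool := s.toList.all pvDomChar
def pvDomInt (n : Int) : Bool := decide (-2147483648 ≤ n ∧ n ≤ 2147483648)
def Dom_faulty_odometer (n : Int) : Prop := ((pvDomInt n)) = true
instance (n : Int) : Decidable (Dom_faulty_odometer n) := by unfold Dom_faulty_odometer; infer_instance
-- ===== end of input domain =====

-- B replaces A's most-significant-first recursion with an iterative least-significant-first
-- loop threading an explicit place-value accumulator (objective: simpler decomposition).


-- ===== PORT A =====
-- A's recursion does not terminate for negative n (Python raises RecursionError);
-- the fuel n.natAbs + 1 is a totality guard only, never exhausted on Pre_ (0 ≤ n).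
def faultyOdometerFuel : Nat → Int → Int
  | 0, _ => 0
  | fuel + 1, n =>
    if n = 0 then 0
    else
      let d := PySem.Int.mod n 10
      let d := if d > 4 then d - 1 else d
      d + 9 * faultyOdometerFuel fuel (PySem.Int.floordiv n 10)

def faulty_odometer (n : Int) : Int := faultyOdometerFuel (n.natAbs + 1) n

-- ===== PORT B =====
def faultyOdometerLoop (n result place : Int) : Int :=
  if h : n > 0 then
    let d := PySem.Int.mod n 10
    let d := if d > 4 then d - 1 else d
    faultyOdometerLoop (PySem.Int.floordiv n 10) (result + d * place) (place * 9)
  else result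
termination_by n.natAbs
decreasing_by
  have h1 : PySem.Int.floordiv n 10 = n / 10 := PySem.Int.floordiv_eq_ediv_of_pos (by norm_num)
  rw [h1]; omega

def faulty_odometer_alt (n : Int) : Int := faultyOdometerLoop n 0 1

-- ===== PRECONDITION & SPEC =====
-- Pre_ excludes negative n, on which A raises RecursionError.
def Pre_faulty_odometer (n : Int) : Prop := 0 ≤ n
instance (n : Int) : Decidable (Pre_faulty_odometer n) := by unfold Pre_faulty_odometer; infer_instance
def pvWitness_faulty_odometer : Int := 15

-- On negative n, A raises RecursionError (n//10 never reaches 0) while B's loop condition n > 0 makes it return 0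
-- (made checkable by Claim_raises_faulty_odometer, proved at the bottom as faulty_odometer_raises).
def Raises_faulty_odometer (n : Int) : Prop := n < 0
instance (n : Int) : Decidable (Raises_faulty_odometer n) := by unfold Raises_faulty_odometer; infer_instance
def pvRaiseWitness_faulty_odometer : Int := -5
def pvRaiseWitnessOut_faulty_odometer : Int := 0

def Spec_faulty_odometer (n : Int) (out : Int) : Prop := out = faulty_odometer_alt n
instance (n : Int) (out : Int) : Decidable (Spec_faulty_odometer n out) := by unfold Spec_faulty_odometer; infer_instance

-- ===== CLAIM (what is proved, stated in full; the proofs are below) =====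
def Claim_equal_faulty_odometer : Prop := ∀ (n : Int), Dom_faulty_odometer n → Pre_faulty_odometer n → Spec_faulty_odometer n (faulty_odometer n)
def Claim_raises_faulty_odometer : Prop := (∀ (n : Int), Dom_faulty_odometer n → Raises_faulty_odometer n → ¬ Pre_faulty_odometer n) ∧ (Dom_faulty_odometer (pvRaiseWitness_faulty_odometer) ∧ Raises_faulty_odometer (pvRaiseWitness_faulty_odometer) ∧ faulty_odometer_alt (pvRaiseWitness_faulty_odometer) = pvRaiseWitnessOut_faulty_odometer)

-- ===== LEMMAS AND PROOFS =====
theorem loop_eq_fuel (fuel : Nat) : ∀ (n r p : Int), 0 ≤ n → n.natAbs < fuel →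
    faultyOdometerLoop n r p = r + p * faultyOdometerFuel fuel n := by
  induction fuel with
  | zero => intro n r p _ h; omega
  | succ f ih =>
    intro n r p hn hlt
    rw [faultyOdometerLoop, faultyOdometerFuel]
    by_cases h0 : n = 0
    · simp [h0]
    · have hpos : n > 0 := by omega
      have hdiv : PySem.Int.floordiv n 10 = n / 10 := PySem.Int.floordiv_eq_ediv_of_pos (by norm_num)
      rw [dif_pos hpos, ih _ _ _ (by rw [hdiv]; omega) (by rw [hdiv]; omega), if_neg h0]
      ring

theorem faulty_odometer_spec : Claim_equal_faulty_odometer := by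
  intro n _ hpre
  unfold Spec_faulty_odometer faulty_odometer faulty_odometer_alt
  rw [loop_eq_fuel (n.natAbs + 1) n 0 1 hpre (by omega)]
  ring

def faulty_odometer_raises : Claim_raises_faulty_odometer := by
  unfold Claim_raises_faulty_odometer
  refine ⟨fun n _ h => by unfold Raises_faulty_odometer at h; unfold Pre_faulty_odometer; omega, by decide, by decide, ?_⟩
  unfold faulty_odometer_alt pvRaiseWitness_faulty_odometer pvRaiseWitnessOut_faulty_odometer
  rw [faultyOdometerLoop]
  norm_num
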